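-- pv_equiv track=rewrite | github.com/lihaonanbill/ANEG | Game.py | split_and_extract
-- ===== SOURCE A (Python) =====
-- def split_and_extract(s, n, k):
--     # 计算每一份的长度
--     part_length = len(s) // n
--     result = []
--
--     # 遍历每一份
--     for i in range(n):
--         # 获取当前份的起始和结束位置
--         start = i * part_length
--         end = start + part_length if i != n - 1 else len(s)  # 处理最后一份
--         part = s[start:end]
--
--         # 如果该部分的长度足够k，取第k个字符
--         if len(part) >= k:
--             result.append(part[-1-k])  # k-1 因为索引从0开始
--         else:
--             result.append('')  # 如果该部分的长度小于k，添加空字符串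
--
--     # 拼接结果并返回
--     return ''.join(result)
-- ===== SOURCE B (Python) =====
-- def split_and_extract(s, n, k):
--     m = len(s)
--     p = m // n  # raises ZeroDivisionError for n == 0, like A
--     if n < 1:
--         return ''
--     # All parts except the last have length p, and within each the picked
--     # character sits at the same offset (-1 - k) % p, so one strided slice
--     # collects every pick of the first n - 1 parts at once (when k <= p;
--     # otherwise none of those parts yields a character).
--     res = s[(-1 - k) % p : (n - 1) * p : p] if 0 < p and k <= p else ''
--     # The last part has length m - (n - 1) * p; pick its character directly.
--     last_len = m - (n - 1) * p
--     if 0 < last_len and k <= last_len: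
--         res += s[(n - 1) * p + (-1 - k) % last_len]
--     return res
-- ===== Notes on version B (the rewrite author's own statement) =====
-- stated objective: faster
-- what changed: B has no per-part loop at all: since every part but the last has the same length p and the picked character sits at the same offset (-1-k) % p inside each, one strided slice s[q:(n-1)*p:p] collects all picks of the first n-1 parts at once, and the last part's character is indexed directly; A instead loops over the n parts, materialising each substring.
import Mathlib
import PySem

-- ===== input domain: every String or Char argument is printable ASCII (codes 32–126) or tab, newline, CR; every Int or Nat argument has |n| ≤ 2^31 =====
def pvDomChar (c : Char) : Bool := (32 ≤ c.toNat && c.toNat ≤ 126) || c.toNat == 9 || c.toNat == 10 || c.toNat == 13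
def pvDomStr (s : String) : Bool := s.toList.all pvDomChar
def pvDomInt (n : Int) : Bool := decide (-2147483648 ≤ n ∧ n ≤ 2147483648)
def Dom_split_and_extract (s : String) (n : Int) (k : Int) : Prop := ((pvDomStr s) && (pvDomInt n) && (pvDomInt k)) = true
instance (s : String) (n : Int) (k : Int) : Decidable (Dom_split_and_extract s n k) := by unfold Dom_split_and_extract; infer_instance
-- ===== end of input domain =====

-- B replaces A's per-part loop by one strided slice collecting the picks of all equal-length parts at once, plus a direct index into the last part (objective: faster).


-- ===== PORT A =====
-- part = s[start:end] of iteration i (start = i*partLength, end = start+partLength except last part)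
def aPart (s : String) (partLength n : Int) (i : Int) : String :=
  PySem.Str.slice s (some (i * partLength))
    (some (if i ≠ n - 1 then i * partLength + partLength else PySem.Str.len s))

def split_and_extract (s : String) (n : Int) (k : Int) : String :=
  let partLength : Int := PySem.Int.floordiv (PySem.Str.len s) n
  let result : List String :=
    (PySem.List.pyRange 0 n 1).foldl (fun res i =>
      if k ≤ PySem.Str.len (aPart s partLength n i) then
        res ++ [((PySem.Str.pyGet? (aPart s partLength n i) (-1 - k)).map (fun c => String.ofList [c])).getD ""]
      else
        res ++ [""]) []
  PySem.Str.join "" result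

-- ===== PORT B =====
def split_and_extract_alt (s : String) (n : Int) (k : Int) : String :=
  let m : Int := PySem.Str.len s
  let p : Int := PySem.Int.floordiv m n
  if n < 1 then "" else
    -- one strided slice s[(-1-k) % p : (n-1)*p : p] collects the picks of the first n-1 parts;
    -- step p > 0 there, so Python's slice always yields a value: getD "" is the faithful total reading
    let res : String :=
      if 0 < p ∧ k ≤ p then
        (PySem.Str.slice? s (some (PySem.Int.mod (-1 - k) p)) (some ((n - 1) * p)) p).getD ""
      else ""
    let lastLen : Int := m - (n - 1) * p
    if 0 < lastLen ∧ k ≤ lastLen then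
      res ++ (((PySem.Str.pyGet? s ((n - 1) * p + PySem.Int.mod (-1 - k) lastLen)).map (fun c => String.ofList [c])).getD "")
    else res

-- ===== PRECONDITION & SPEC =====
-- Pre_ excludes exactly the inputs on which Python A raises: n = 0 (ZeroDivisionError), and k equal to a
-- part's length or below minus that length (part[-1-k] IndexError on that part).
def Pre_split_and_extract (s : String) (n : Int) (k : Int) : Prop :=
  n ≠ 0 ∧ (0 < n →
    (k ≠ PySem.Str.len s - (n - 1) * PySem.Int.floordiv (PySem.Str.len s) n ∧
     -(PySem.Str.len s - (n - 1) * PySem.Int.floordiv (PySem.Str.len s) n) ≤ k ∧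
     (2 ≤ n → k ≠ PySem.Int.floordiv (PySem.Str.len s) n ∧ -(PySem.Int.floordiv (PySem.Str.len s) n) ≤ k)))
instance (s : String) (n : Int) (k : Int) : Decidable (Pre_split_and_extract s n k) := by
  unfold Pre_split_and_extract; infer_instance

def pvWitness_split_and_extract : String × Int × Int := ("abcdef", 2, 1)

def Spec_split_and_extract (s : String) (n : Int) (k : Int) (out : String) : Prop := out = split_and_extract_alt s n k
instance (s : String) (n : Int) (k : Int) (out : String) : Decidable (Spec_split_and_extract s n k out) := by unfold Spec_split_and_extract; infer_instance

-- ===== CLAIM (what is proved, stated in full; the proofs are below) =====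
def Claim_equal_split_and_extract : Prop := ∀ (s : String) (n : Int) (k : Int), Dom_split_and_extract s n k → Pre_split_and_extract s n k → Spec_split_and_extract s n k (split_and_extract s n k)

-- ===== LEMMAS AND PROOFS =====

-- length of part i of A, expressed arithmetically
def pvLen (m n p : Int) (i : Int) : Int := if i = n - 1 then m - (n - 1) * p else p

theorem pv_join_empty_flatten (xs : List (List Char)) : PySem.Chars.join [] xs = xs.flatten := by
  induction xs with
  | nil => simp [PySem.Chars.join_nil]
  | cons a t ih =>
    cases t with
    | nil => simp [PySem.Chars.join_singleton]
    | cons b r => rw [PySem.Chars.join_cons_cons]; simp_all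

theorem pv_facts (s : String) (n i : Int) (hn : 0 < n) (hi : 0 ≤ i) (hin : i < n) :
    0 ≤ i * PySem.Int.floordiv (PySem.Str.len s) n ∧
    0 ≤ pvLen (PySem.Str.len s) n (PySem.Int.floordiv (PySem.Str.len s) n) i ∧
    i * PySem.Int.floordiv (PySem.Str.len s) n +
      pvLen (PySem.Str.len s) n (PySem.Int.floordiv (PySem.Str.len s) n) i ≤ PySem.Str.len s ∧
    (aPart s (PySem.Int.floordiv (PySem.Str.len s) n) n i).toList =
      ((s.toList.drop (i * PySem.Int.floordiv (PySem.Str.len s) n).toNat).take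
        (pvLen (PySem.Str.len s) n (PySem.Int.floordiv (PySem.Str.len s) n) i).toNat) := by
  have hm : PySem.Str.len s = (s.toList.length : Int) := PySem.Str.len_eq s
  set M := PySem.Str.len s with hM
  set p := PySem.Int.floordiv M n with hp
  have hpd : p = M / n := PySem.Int.floordiv_eq_ediv_of_pos hn
  have hm0 : 0 ≤ M := by rw [hm]; positivity
  have hp0 : 0 ≤ p := by rw [hpd]; exact Int.ediv_nonneg hm0 hn.le
  have h1 := Int.ediv_add_emod M n
  have h2 := Int.emod_nonneg M (ne_of_gt hn)
  have hnp : n * p ≤ M := by rw [hpd]; linarith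
  have hipp : i * p + p ≤ n * p := by
    calc i * p + p = (i + 1) * p := by ring
    _ ≤ n * p := mul_le_mul_of_nonneg_right (by omega) hp0
  have hn1p : (n - 1) * p ≤ n * p := mul_le_mul_of_nonneg_right (by omega) hp0
  have ha0 : 0 ≤ i * p := mul_nonneg hi hp0
  have hL0 : 0 ≤ pvLen M n p i := by
    unfold pvLen; split
    · linarith
    · exact hp0
  have hLe : i * p + pvLen M n p i ≤ M := by
    unfold pvLen; split
    · next h => rw [h]; linarith
    · linarith
  refine ⟨ha0, hL0, hLe, ?_⟩
  unfold aPart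
  have hstop : (if i ≠ n - 1 then i * p + p else M) = i * p + pvLen M n p i := by
    by_cases h : i = n - 1
    · subst h; simp [pvLen]
    · simp [pvLen, h]
  obtain ⟨A, hA⟩ : ∃ A : Nat, i * p = (A : Int) := ⟨(i * p).toNat, (Int.toNat_of_nonneg ha0).symm⟩
  obtain ⟨E, hE⟩ : ∃ E : Nat, i * p + pvLen M n p i = (E : Int) :=
    ⟨(i * p + pvLen M n p i).toNat, (Int.toNat_of_nonneg (by linarith)).symm⟩
  rw [PySem.Str.toList_slice, PySem.Chars.slice_eq_listSlice, hstop, hE, hA, PySem.List.slice_natCast]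
  simp only [Int.toNat_natCast]
  congr 1
  omega

theorem pv_part_len (s : String) (n i : Int) (hn : 0 < n) (hi : 0 ≤ i) (hin : i < n) :
    PySem.Str.len (aPart s (PySem.Int.floordiv (PySem.Str.len s) n) n i) =
      pvLen (PySem.Str.len s) n (PySem.Int.floordiv (PySem.Str.len s) n) i := by
  obtain ⟨ha0, hL0, hLe, hpart⟩ := pv_facts s n i hn hi hin
  have hMl := PySem.Str.len_eq s
  rw [PySem.Str.len_eq, hpart]
  simp only [List.length_take, List.length_drop]
  omega

theorem pv_part_get (s : String) (n k i : Int) (hn : 0 < n) (hi : 0 ≤ i) (hin : i < n)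
    (hk : k ≤ pvLen (PySem.Str.len s) n (PySem.Int.floordiv (PySem.Str.len s) n) i)
    (hne : k ≠ pvLen (PySem.Str.len s) n (PySem.Int.floordiv (PySem.Str.len s) n) i)
    (hlo : -(pvLen (PySem.Str.len s) n (PySem.Int.floordiv (PySem.Str.len s) n) i) ≤ k) :
    PySem.Str.pyGet? (aPart s (PySem.Int.floordiv (PySem.Str.len s) n) n i) (-1 - k) =
      PySem.Str.pyGet? s (i * PySem.Int.floordiv (PySem.Str.len s) n +
        PySem.Int.mod (-1 - k) (pvLen (PySem.Str.len s) n (PySem.Int.floordiv (PySem.Str.len s) n) i)) := by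
  obtain ⟨ha0, hL0, hLe, hpart⟩ := pv_facts s n i hn hi hin
  have hMl := PySem.Str.len_eq s
  set M := PySem.Str.len s with hM
  set p := PySem.Int.floordiv M n with hp
  set L := pvLen M n p i with hL
  have hLpos : 0 < L := by omega
  have hkl : k < L := lt_of_le_of_ne hk hne
  set t : Int := -1 - k with ht
  have hmod : PySem.Int.mod t L = if 0 ≤ t then t else t + L := by
    rw [PySem.Int.mod_eq_emod_of_pos hLpos]
    split
    · exact Int.emod_eq_of_lt (by omega) (by omega)
    · have h1 : (t + L) % L = t % L := by
        simpa using Int.add_mul_emod_self_left (a := t) (b := L) (c := 1)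
      rw [← h1]; exact Int.emod_eq_of_lt (by omega) (by omega)
  have hlen : (List.take L.toNat (List.drop (i * p).toNat s.toList)).length = L.toNat := by
    simp only [List.length_take, List.length_drop]; omega
  simp only [PySem.Str.pyGet?_eq, PySem.Chars.pyGet?_eq_listPyGet?, hpart,
    PySem.List.pyGet?, PySem.List.pyIdx?, hlen, hmod]
  by_cases h0 : 0 ≤ t
  · have c1 : t < (L.toNat : Int) := by omega
    have c2 : 0 ≤ i * p + t := by omega
    have c3 : i * p + t < (s.toList.length : Int) := by omega
    simp only [if_pos h0, if_pos c1, if_pos c2, if_pos c3, Option.bind_some]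
    rw [List.getElem?_take_of_lt (by omega), List.getElem?_drop]
    congr 1; omega
  · have c1 : -(L.toNat : Int) ≤ t := by omega
    have c2 : 0 ≤ i * p + (t + L) := by omega
    have c3 : i * p + (t + L) < (s.toList.length : Int) := by omega
    simp only [if_neg h0, if_pos c1, if_pos c2, if_pos c3, Option.bind_some]
    rw [List.getElem?_take_of_lt (by omega), List.getElem?_drop]
    congr 1; omega

-- picked string's char list is the option's toList
theorem pv_pick_toList (o : Option Char) :
    ((o.map (fun c => String.ofList [c])).getD "").toList = o.toList := by
  cases o <;> simp

theorem pv_filterMap_eq_flatten_toList {α β : Type} (f : α → Option β) (l : List α) :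
    l.filterMap f = (l.map (fun x => (f x).toList)).flatten := by
  induction l with
  | nil => rfl
  | cons a t ih => cases h : f a <;> simp [List.filterMap_cons, h, ih]

-- pyGet? at a nonnegative index is plain list indexing
theorem pv_pyGet?_nonneg (xs : List Char) (t : Int) (h : 0 ≤ t) :
    PySem.List.pyGet? xs t = xs[t.toNat]? := by
  simp only [PySem.List.pyGet?, PySem.List.pyIdx?, if_pos h]
  by_cases hlt : t < (xs.length : Int)
  · simp only [if_pos hlt, Option.bind_some]
  · rw [if_neg hlt]
    have : xs.length ≤ t.toNat := by omega
    simp [List.getElem?_eq_none this]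

-- the strided slice xs[q : (n-1)*p : p], 0 ≤ q < p, n*p ≤ len, 1 ≤ n
theorem pv_slice_stride (xs : List Char) (q p n : Int) (hp : 0 < p) (hq0 : 0 ≤ q)
    (hqp : q < p) (hn : 1 ≤ n) (hnm : n * p ≤ (xs.length : Int)) :
    PySem.List.slice? xs (some q) (some ((n - 1) * p)) p =
      some ((List.range (n - 1).toNat).filterMap (fun j : Nat => xs[(q + p * (j : Int)).toNat]?)) := by
  have hp0 : p ≠ 0 := by omega
  have hppos : ¬ p < 0 := by omega
  have he0 : 0 ≤ (n - 1) * p := mul_nonneg (by omega) hp.le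
  have hpm : p ≤ (xs.length : Int) := le_trans (by nlinarith) hnm
  have hem : (n - 1) * p ≤ (xs.length : Int) := le_trans (mul_le_mul_of_nonneg_right (by omega) hp.le) hnm
  simp only [PySem.List.slice?, PySem.List.sliceIndices, if_neg hp0, if_neg hppos,
    if_neg (not_lt.mpr hq0), if_neg (not_lt.mpr he0), if_pos hp]
  have hstart : min q (xs.length : Int) = q := min_eq_left (by omega)
  have hstop : min ((n - 1) * p) (xs.length : Int) = (n - 1) * p := min_eq_left hem
  rw [hstart, hstop]
  have hcount : (if q < (n - 1) * p then (((n - 1) * p - q + p - 1) / p).toNat else 0) = (n - 1).toNat := by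
    by_cases hc : q < (n - 1) * p
    · rw [if_pos hc]
      have hn2 : 1 ≤ n - 1 := by nlinarith
      have : (n - 1) * p - q + p - 1 = (p - 1 - q) + p * (n - 1) := by ring
      rw [this, Int.add_mul_ediv_left _ _ hp0, Int.ediv_eq_zero_of_lt (by omega) (by omega)]
      omega
    · rw [if_neg hc]
      have : n - 1 ≤ 0 := by nlinarith [not_lt.mp hc]
      omega
  rw [hcount]

-- from a List-level slice? value to the String-level getD "" value
theorem pv_str_slice_toList (s : String) (a b : Option Int) (st : Int) (l : List Char)
    (h : PySem.List.slice? s.toList a b st = some l) :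
    ((PySem.Str.slice? s a b st).getD "").toList = l := by
  have hm := PySem.Str.slice?_map s a b st
  rw [PySem.Chars.slice?_eq_listSlice?, h] at hm
  cases hx : PySem.Str.slice? s a b st with
  | none => rw [hx] at hm; simp at hm
  | some str =>
    rw [hx] at hm
    simp only [Option.map_some, Option.some.injEq] at hm
    simpa [hx] using hm

-- ===== VERDICT (by name: the statement is the Claim_ definition above) =====
theorem split_and_extract_spec : Claim_equal_split_and_extract := by
  intro s n k hdom hpre
  unfold Spec_split_and_extract split_and_extract split_and_extract_alt
  dsimp only
  obtain ⟨hn0, hpos⟩ := hpre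
  by_cases hn1 : n < 1
  · rw [if_pos hn1, PySem.List.pyRange_one_eq_nil (by omega)]
    rfl
  rw [if_neg hn1]
  have hn : 0 < n := by omega
  have hMl := PySem.Str.len_eq s
  obtain ⟨hq1, hq2, hq3⟩ := hpos hn
  have hpd : PySem.Int.floordiv (PySem.Str.len s) n = (PySem.Str.len s) / n := PySem.Int.floordiv_eq_ediv_of_pos hn
  have hm0 : 0 ≤ PySem.Str.len s := by rw [hMl]; positivity
  have hp0 : 0 ≤ PySem.Int.floordiv (PySem.Str.len s) n := by rw [hpd]; exact Int.ediv_nonneg hm0 hn.le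
  have h1 := Int.ediv_add_emod (PySem.Str.len s) n
  have h2 := Int.emod_nonneg (PySem.Str.len s) (ne_of_gt hn)
  have hnp : n * (PySem.Int.floordiv (PySem.Str.len s) n) ≤ PySem.Str.len s := by rw [hpd]; linarith
  have hLp : PySem.Int.floordiv (PySem.Str.len s) n ≤ (PySem.Str.len s - (n - 1) * (PySem.Int.floordiv (PySem.Str.len s) n)) := by nlinarith
  have hL0 : 0 ≤ (PySem.Str.len s - (n - 1) * (PySem.Int.floordiv (PySem.Str.len s) n)) := le_trans hp0 hLp
  have hemp : ("" : String).toList = [] := rfl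
  -- A's fold as a map over the range
  have hfunA : (fun (res : List String) (i : Int) =>
      if k ≤ PySem.Str.len (aPart s (PySem.Int.floordiv (PySem.Str.len s) n) n i) then
        res ++ [((PySem.Str.pyGet? (aPart s (PySem.Int.floordiv (PySem.Str.len s) n) n i) (-1 - k)).map (fun c => String.ofList [c])).getD ""]
      else res ++ [""]) = (fun res i => res ++
        [if k ≤ PySem.Str.len (aPart s (PySem.Int.floordiv (PySem.Str.len s) n) n i) then
        ((PySem.Str.pyGet? (aPart s (PySem.Int.floordiv (PySem.Str.len s) n) n i) (-1 - k)).map (fun c => String.ofList [c])).getD "" else ""]) := by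
    funext res i; split <;> rfl
  rw [hfunA, PySem.List.foldl_append_singleton_eq_map]
  simp only [List.nil_append]
  apply String.toList_inj.mp
  rw [PySem.Str.toList_join, List.map_map, hemp, pv_join_empty_flatten]
  -- split A's range at n-1
  have hsing : PySem.List.pyRange (n - 1) n 1 = [n - 1] := by
    simpa using PySem.List.pyRange_one_singleton (n - 1)
  rw [PySem.List.pyRange_one_append 0 (n - 1) n (by omega) (by omega),
    hsing, List.map_append, List.flatten_append]
  -- head: picks of parts 0..n-2 equal B's strided slice
  have hhead : ((PySem.List.pyRange 0 (n - 1) 1).map (String.toList ∘ (fun i =>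
      if k ≤ PySem.Str.len (aPart s (PySem.Int.floordiv (PySem.Str.len s) n) n i) then
        ((PySem.Str.pyGet? (aPart s (PySem.Int.floordiv (PySem.Str.len s) n) n i) (-1 - k)).map (fun c => String.ofList [c])).getD "" else ""))).flatten =
      (if 0 < PySem.Int.floordiv (PySem.Str.len s) n ∧ k ≤ PySem.Int.floordiv (PySem.Str.len s) n then
        (PySem.Str.slice? s (some (PySem.Int.mod (-1 - k) (PySem.Int.floordiv (PySem.Str.len s) n))) (some ((n - 1) * (PySem.Int.floordiv (PySem.Str.len s) n))) (PySem.Int.floordiv (PySem.Str.len s) n)).getD ""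
      else "").toList := by
    by_cases hcond : 0 < PySem.Int.floordiv (PySem.Str.len s) n ∧ k ≤ PySem.Int.floordiv (PySem.Str.len s) n
    · obtain ⟨hpp, hkp⟩ := hcond
      rw [if_pos ⟨hpp, hkp⟩]
      have hq0 : 0 ≤ PySem.Int.mod (-1 - k) (PySem.Int.floordiv (PySem.Str.len s) n) := by
        rw [PySem.Int.mod_eq_emod_of_pos hpp]; exact Int.emod_nonneg _ (by omega)
      have hqp : PySem.Int.mod (-1 - k) (PySem.Int.floordiv (PySem.Str.len s) n) < PySem.Int.floordiv (PySem.Str.len s) n := by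
        rw [PySem.Int.mod_eq_emod_of_pos hpp]; exact Int.emod_lt_of_pos _ hpp
      rw [pv_str_slice_toList s _ _ _ _
        (pv_slice_stride s.toList (PySem.Int.mod (-1 - k) (PySem.Int.floordiv (PySem.Str.len s) n)) (PySem.Int.floordiv (PySem.Str.len s) n) n hpp hq0 hqp (by omega) (by rw [← hMl]; exact hnp))]
      rw [pv_filterMap_eq_flatten_toList, PySem.List.pyRange_one, List.map_map]
      simp only [sub_zero]
      congr 1
      apply List.map_congr_left
      intro j hj
      rw [List.mem_range] at hj
      have hjn : ((j : Int)) < n - 1 := by omega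
      have hi0 : (0 : Int) ≤ 0 + (j : Int) := by omega
      have hin : 0 + (j : Int) < n := by omega
      have hine : 0 + (j : Int) ≠ n - 1 := by omega
      have hn2 : 2 ≤ n := by omega
      obtain ⟨hk1, hk2⟩ := hq3 hn2
      have hlenj : pvLen (PySem.Str.len s) n (PySem.Int.floordiv (PySem.Str.len s) n) (0 + (j : Int)) = PySem.Int.floordiv (PySem.Str.len s) n := by
        unfold pvLen; rw [if_neg hine]
      have hplen := pv_part_len s n (0 + (j : Int)) hn hi0 hin
      have hget := pv_part_get s n k (0 + (j : Int)) hn hi0 hin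
        (by rw [hlenj]; exact hkp) (by rw [hlenj]; exact hk1) (by rw [hlenj]; exact hk2)
      rw [hlenj] at hget
      have hc : k ≤ PySem.Str.len (aPart s (PySem.Int.floordiv (PySem.Str.len s) n) n (0 + (j : Int))) := by
        rw [hplen, hlenj]; exact hkp
      simp only [Function.comp_apply, if_pos hc]
      rw [pv_pick_toList, hget, PySem.Str.pyGet?_eq, PySem.Chars.pyGet?_eq_listPyGet?,
        pv_pyGet?_nonneg _ _ (by nlinarith [mul_nonneg (Int.natCast_nonneg (n := j)) hp0, hq0])]
      have harith : (0 + (j : Int)) * (PySem.Int.floordiv (PySem.Str.len s) n) + (PySem.Int.mod (-1 - k) (PySem.Int.floordiv (PySem.Str.len s) n)) = (PySem.Int.mod (-1 - k) (PySem.Int.floordiv (PySem.Str.len s) n)) + (PySem.Int.floordiv (PySem.Str.len s) n) * (j : Int) := by ring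
      rw [harith]
    · rw [if_neg hcond, hemp]
      by_cases hkp : k ≤ PySem.Int.floordiv (PySem.Str.len s) n
      · -- then p = 0, and Pre_ forces n = 1, so the head range is empty
        have hpp : ¬ 0 < PySem.Int.floordiv (PySem.Str.len s) n := fun h => hcond ⟨h, hkp⟩
        have hn1' : n = 1 := by
          by_contra hne
          have hn2 : 2 ≤ n := by omega
          obtain ⟨hk1, hk2⟩ := hq3 hn2
          omega
        have hnil : PySem.List.pyRange 0 (n - 1) 1 = [] :=
          PySem.List.pyRange_one_eq_nil (by omega)
        rw [hnil]
        rfl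
      · have hall : ∀ i ∈ PySem.List.pyRange 0 (n - 1) 1,
            (String.toList ∘ (fun i =>
      if k ≤ PySem.Str.len (aPart s (PySem.Int.floordiv (PySem.Str.len s) n) n i) then
        ((PySem.Str.pyGet? (aPart s (PySem.Int.floordiv (PySem.Str.len s) n) n i) (-1 - k)).map (fun c => String.ofList [c])).getD "" else "")) i = [] := by
          intro i hi
          rw [PySem.List.mem_pyRange_one] at hi
          have hine : i ≠ n - 1 := by omega
          have hlenp : pvLen (PySem.Str.len s) n (PySem.Int.floordiv (PySem.Str.len s) n) i = PySem.Int.floordiv (PySem.Str.len s) n := by unfold pvLen; rw [if_neg hine]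
          have hplen := pv_part_len s n i hn hi.1 (by omega)
          have hc : ¬ k ≤ PySem.Str.len (aPart s (PySem.Int.floordiv (PySem.Str.len s) n) n i) := by
            rw [hplen, hlenp]; exact hkp
          simp only [Function.comp_apply, if_neg hc]
          rfl
        rw [List.map_congr_left hall]
        simp
  rw [hhead]
  -- last part
  have hlast : ((([(n - 1 : Int)]).map (String.toList ∘ (fun i =>
      if k ≤ PySem.Str.len (aPart s (PySem.Int.floordiv (PySem.Str.len s) n) n i) then
        ((PySem.Str.pyGet? (aPart s (PySem.Int.floordiv (PySem.Str.len s) n) n i) (-1 - k)).map (fun c => String.ofList [c])).getD "" else ""))).flatten) =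
      (if 0 < (PySem.Str.len s - (n - 1) * (PySem.Int.floordiv (PySem.Str.len s) n)) ∧ k ≤ (PySem.Str.len s - (n - 1) * (PySem.Int.floordiv (PySem.Str.len s) n)) then
        (((PySem.Str.pyGet? s ((n - 1) * (PySem.Int.floordiv (PySem.Str.len s) n) + PySem.Int.mod (-1 - k) (PySem.Str.len s - (n - 1) * (PySem.Int.floordiv (PySem.Str.len s) n)))).map (fun c => String.ofList [c])).getD "").toList
      else []) := by
    have hlenL : pvLen (PySem.Str.len s) n (PySem.Int.floordiv (PySem.Str.len s) n) (n - 1) = (PySem.Str.len s - (n - 1) * (PySem.Int.floordiv (PySem.Str.len s) n)) := by unfold pvLen; rw [if_pos rfl]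
    have hplen := pv_part_len s n (n - 1) hn (by omega) (by omega)
    by_cases hkL : k ≤ (PySem.Str.len s - (n - 1) * (PySem.Int.floordiv (PySem.Str.len s) n))
    · have hLpos : 0 < (PySem.Str.len s - (n - 1) * (PySem.Int.floordiv (PySem.Str.len s) n)) := by omega
      rw [if_pos ⟨hLpos, hkL⟩]
      have hget := pv_part_get s n k (n - 1) hn (by omega) (by omega)
        (by rw [hlenL]; exact hkL) (by rw [hlenL]; exact hq1) (by rw [hlenL]; exact hq2)
      rw [hlenL] at hget
      have hc : k ≤ PySem.Str.len (aPart s (PySem.Int.floordiv (PySem.Str.len s) n) n (n - 1)) := by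
        rw [hplen, hlenL]; exact hkL
      simp only [List.map_cons, List.map_nil, Function.comp_apply, List.flatten, if_pos hc]
      rw [hget]
      simp
    · rw [if_neg (by tauto)]
      have hc : ¬ k ≤ PySem.Str.len (aPart s (PySem.Int.floordiv (PySem.Str.len s) n) n (n - 1)) := by
        rw [hplen, hlenL]; exact hkL
      simp only [List.map_cons, List.map_nil, Function.comp_apply, List.flatten, if_neg hc]
      simp [hemp]
  rw [hlast]
  -- assemble B's side
  by_cases hBl : 0 < (PySem.Str.len s - (n - 1) * (PySem.Int.floordiv (PySem.Str.len s) n)) ∧ k ≤ (PySem.Str.len s - (n - 1) * (PySem.Int.floordiv (PySem.Str.len s) n))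
  · rw [if_pos hBl, if_pos hBl, String.toList_append]
  · rw [if_neg hBl, if_neg hBl]
    simp
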